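-- pv_equiv track=rewrite | github.com/BlueBash/ragflow | rag/app/website_v3.py | exclude_pattern_from_urls
-- ===== SOURCE A (Python) =====
-- def exclude_pattern_from_urls(urls, exclude_patterns):
--     filtered_urls = []
--     for url in urls:
--         should_exclude = False
--         for pattern in exclude_patterns:
--             if not pattern.strip():
--                 continue
--             if pattern.endswith("/*"):
--                 if pattern[:-2] in url:
--                     should_exclude = True
--                     break
--             elif url.endswith(pattern):
--                 should_exclude = True
--                 break
--
--         if not should_exclude:
--             filtered_urls.append(url)
--
--     return filtered_urls
-- ===== SOURCE B (Python) =====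
-- def exclude_pattern_from_urls(urls, exclude_patterns):
--     # Pattern-major: each pattern makes one pass that removes its matches
--     # from the surviving URL list; no per-URL inner loop at all.
--     survivors = list(urls)
--     for pattern in exclude_patterns:
--         if not pattern.strip():
--             continue
--         if pattern.endswith("/*"):
--             sub = pattern[:-2]
--             survivors = [u for u in survivors if sub not in u]
--         else:
--             survivors = [u for u in survivors if not u.endswith(pattern)]
--     return survivors
-- ===== Notes on version B (the rewrite author's own statement) =====
-- stated objective: alternative
-- what changed: B inverts the loop nesting: instead of A's per-URL inner scan over the patterns with a break, B folds over the patterns, each non-blank pattern performing one sieve pass that deletes its matching URLs from the surviving list; correctness follows because successive filters compose to 'no pattern matches' and filtering preserves URL order.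
import Mathlib
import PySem

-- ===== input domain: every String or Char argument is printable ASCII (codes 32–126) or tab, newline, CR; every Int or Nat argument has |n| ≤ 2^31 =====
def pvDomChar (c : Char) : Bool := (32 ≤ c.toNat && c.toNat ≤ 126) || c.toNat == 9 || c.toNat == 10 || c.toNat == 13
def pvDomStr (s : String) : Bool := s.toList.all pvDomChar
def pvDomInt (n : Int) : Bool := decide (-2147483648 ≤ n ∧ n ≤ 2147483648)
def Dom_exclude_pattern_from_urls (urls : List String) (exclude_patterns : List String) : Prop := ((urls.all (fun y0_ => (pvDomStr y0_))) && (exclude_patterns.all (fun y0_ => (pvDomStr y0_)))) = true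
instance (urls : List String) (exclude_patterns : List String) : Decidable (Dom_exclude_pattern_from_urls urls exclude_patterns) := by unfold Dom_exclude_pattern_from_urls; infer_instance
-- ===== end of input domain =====

-- B inverts the loop nesting: a fold over the patterns where each non-blank pattern sieves its matches out of the surviving URL list (alternative decomposition, same cost).


-- ===== PORT A =====
-- the inner 'for pattern in exclude_patterns' loop with its break (result: should_exclude)
def pvShouldExclude (url : String) : List String → Bool
  | [] => false
  | pattern :: rest =>
    if PySem.Str.strip pattern = "" then pvShouldExclude url rest
    else if PySem.Str.endswith pattern "/*" then
      if PySem.Str.isIn (PySem.Str.slice pattern none (some (-2))) url then true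
      else pvShouldExclude url rest
    else if PySem.Str.endswith url pattern then true
    else pvShouldExclude url rest

def exclude_pattern_from_urls (urls : List String) (exclude_patterns : List String) : List String :=
  urls.foldl (fun filtered_urls url =>
    if pvShouldExclude url exclude_patterns then filtered_urls
    else filtered_urls ++ [url]) []

-- ===== PORT B =====
def exclude_pattern_from_urls_alt (urls : List String) (exclude_patterns : List String) : List String :=
  exclude_patterns.foldl (fun survivors pattern =>
    if PySem.Str.strip pattern = "" then survivors
    else if PySem.Str.endswith pattern "/*" then
      survivors.filter (fun u => !PySem.Str.isIn (PySem.Str.slice pattern none (some (-2))) u)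
    else survivors.filter (fun u => !PySem.Str.endswith u pattern)) urls

-- ===== PRECONDITION & SPEC =====
def Spec_exclude_pattern_from_urls (urls : List String) (exclude_patterns : List String) (out : List String) : Prop := out = exclude_pattern_from_urls_alt urls exclude_patterns
instance (urls : List String) (exclude_patterns : List String) (out : List String) : Decidable (Spec_exclude_pattern_from_urls urls exclude_patterns out) := by unfold Spec_exclude_pattern_from_urls; infer_instance

-- ===== CLAIM (what is proved, stated in full; the proofs are below) =====
def Claim_equal_exclude_pattern_from_urls : Prop := ∀ (urls : List String) (exclude_patterns : List String), Dom_exclude_pattern_from_urls urls exclude_patterns → Spec_exclude_pattern_from_urls urls exclude_patterns (exclude_pattern_from_urls urls exclude_patterns)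

-- ===== LEMMAS AND PROOFS =====
-- B's pattern-major fold equals one filter of the initial list by 'no pattern matches'
theorem alt_eq_filter (eps : List String) (urls : List String) :
    exclude_pattern_from_urls_alt urls eps
      = urls.filter (fun u => !pvShouldExclude u eps) := by
  induction eps generalizing urls with
  | nil => simp [exclude_pattern_from_urls_alt, pvShouldExclude]
  | cons p rest ih =>
    have hstep : exclude_pattern_from_urls_alt urls (p :: rest)
        = exclude_pattern_from_urls_alt
            (if PySem.Str.strip p = "" then urls
             else if PySem.Str.endswith p "/*" then
               urls.filter (fun u => !PySem.Str.isIn (PySem.Str.slice p none (some (-2))) u)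
             else urls.filter (fun u => !PySem.Str.endswith u p)) rest := by
      unfold exclude_pattern_from_urls_alt
      rw [List.foldl_cons]
    rw [hstep]
    by_cases h1 : PySem.Str.strip p = ""
    · rw [if_pos h1, ih]
      exact List.filter_congr (fun u _ => by
        simp only [pvShouldExclude]
        rw [if_pos h1])
    · rw [if_neg h1]
      by_cases h2 : PySem.Str.endswith p "/*" = true
      · rw [if_pos h2, ih, List.filter_filter]
        exact List.filter_congr (fun u _ => by
          simp only [pvShouldExclude]
          rw [if_neg h1, if_pos h2]
          cases PySem.Str.isIn (PySem.Str.slice p none (some (-2))) u <;> simp)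
      · rw [if_neg h2, ih, List.filter_filter]
        exact List.filter_congr (fun u _ => by
          simp only [pvShouldExclude]
          rw [if_neg h1, if_neg h2]
          cases PySem.Str.endswith u p <;> simp)

-- ===== VERDICT (by name: the statement is the Claim_ definition above) =====
theorem exclude_pattern_from_urls_spec : Claim_equal_exclude_pattern_from_urls := by
  intro urls eps _
  show _ = _
  rw [alt_eq_filter]
  unfold exclude_pattern_from_urls
  have hfun : (fun (acc : List String) url => if pvShouldExclude url eps then acc else acc ++ [url])
      = fun acc url => if (!pvShouldExclude url eps) then acc ++ [url] else acc := by
    funext acc url; cases pvShouldExclude url eps <;> simp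
  rw [hfun, PySem.List.foldl_append_if_eq_filter, List.nil_append]
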